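-- pv_equiv track=rewrite | github.com/Tomstaib/SEP_DMPG | src/util/flask/nodes_for_composite.py | compute_tree_sizes
-- ===== SOURCE A (Python) =====
-- def compute_tree_sizes(num_replications: int) -> int:
--     """
--     !!!Depreciated!!!
--     Computes the tree size of a default tree.
--     """
--     total_number_of_management_nodes = (num_replications // 1000)  # 1000 is exemplary
--
--     management_nodes_per_level: int = 1
--     counter: int = 1
--
--     while management_nodes_per_level * 2 <= total_number_of_management_nodes:
--         management_nodes_per_level *= 2
--         counter += 1
--
--     return counter
-- ===== SOURCE B (Python) =====
-- def compute_tree_sizes(num_replications: int) -> int: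
--     """Closed form: counter = bit_length of total for total >= 1, else 1."""
--     total = num_replications // 1000
--     return total.bit_length() if total >= 1 else 1
-- ===== Notes on version B (the rewrite author's own statement) =====
-- stated objective: faster
-- what changed: Replaced the doubling while-loop with a closed-form int.bit_length() computation (guarded for total < 1).
import Mathlib
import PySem

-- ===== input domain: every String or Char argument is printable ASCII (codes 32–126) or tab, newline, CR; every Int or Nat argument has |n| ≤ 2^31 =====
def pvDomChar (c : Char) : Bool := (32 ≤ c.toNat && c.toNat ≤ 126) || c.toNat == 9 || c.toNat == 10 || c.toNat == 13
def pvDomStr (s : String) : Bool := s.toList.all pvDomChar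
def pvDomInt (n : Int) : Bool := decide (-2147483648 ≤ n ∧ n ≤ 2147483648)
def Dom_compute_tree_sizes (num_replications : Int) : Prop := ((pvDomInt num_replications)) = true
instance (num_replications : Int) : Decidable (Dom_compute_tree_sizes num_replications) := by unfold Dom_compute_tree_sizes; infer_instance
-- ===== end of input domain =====

-- B replaces A's doubling while-loop by a closed-form bit_length (Nat.size) computation: asymptotically faster (O(1) vs O(log n)).


-- ===== PORT A =====
-- A's while-loop; the '0 < m' conjunct is a totality guard only (m starts at 1 and stays positive).
def ctsLoop (total m counter : Int) : Int :=
  if h : 0 < m ∧ m * 2 ≤ total then ctsLoop total (m * 2) (counter + 1) else counter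
termination_by (total - m).toNat
decreasing_by
  have := h.1; have := h.2; omega

def compute_tree_sizes (num_replications : Int) : Int :=
  let total := PySem.Int.floordiv num_replications 1000
  ctsLoop total 1 1

-- ===== PORT B =====
-- int.bit_length() on a nonnegative int is Nat.size of its magnitude.
def compute_tree_sizes_alt (num_replications : Int) : Int :=
  let total := PySem.Int.floordiv num_replications 1000
  if 1 ≤ total then (Nat.size total.toNat : Int) else 1

-- ===== PRECONDITION & SPEC =====
def Spec_compute_tree_sizes (num_replications : Int) (out : Int) : Prop := out = compute_tree_sizes_alt num_replications
instance (num_replications : Int) (out : Int) : Decidable (Spec_compute_tree_sizes num_replications out) := by unfold Spec_compute_tree_sizes; infer_instance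

-- ===== CLAIM (what is proved, stated in full; the proofs are below) =====
def Claim_equal_compute_tree_sizes : Prop := ∀ (num_replications : Int), Dom_compute_tree_sizes num_replications → Spec_compute_tree_sizes num_replications (compute_tree_sizes num_replications)

-- ===== LEMMAS AND PROOFS =====

-- The loop invariant: starting from m = 2^k, the loop adds size(total) - (k+1) (Nat subtraction) to counter.
theorem ctsLoop_pow (total : Int) : ∀ (d k : Nat) (c : Int),
    Nat.size total.toNat - (k + 1) = d →
    ctsLoop total ((2 : Int) ^ k) c = c + ((Nat.size total.toNat - (k + 1) : Nat) : Int) := by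
  intro d
  induction d with
  | zero =>
    intro k c hd
    rw [ctsLoop]
    have hpos : (0 : Int) < 2 ^ k := by positivity
    have hcond : ¬ ((2 : Int) ^ k * 2 ≤ total) := by
      intro hle
      -- 2^(k+1) ≤ total ⇒ 2^(k+1) ≤ total.toNat ⇒ k+1 < size total.toNat, contradicting hd
      have htn : (2 : Nat) ^ (k + 1) ≤ total.toNat := by
        have : ((2 : Int) ^ (k + 1)) ≤ total := by rw [pow_succ]; exact hle
        have h2 : ((2 : Nat) ^ (k + 1) : Int) ≤ total := by push_cast; exact this
        omega
      have := (Nat.lt_size).mpr htn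
      omega
    simp [hpos, hcond, hd]
  | succ j ih =>
    intro k c hd
    rw [ctsLoop]
    have hpos : (0 : Int) < 2 ^ k := by positivity
    have hcond : (2 : Int) ^ k * 2 ≤ total := by
      by_contra hnot
      -- then total.toNat < 2^(k+1), so size ≤ k+1, contradicting hd = j+1 > 0
      have htn : total.toNat < 2 ^ (k + 1) := by
        have hN : ((2 : Nat) ^ (k + 1) : Int) = (2 : Int) ^ k * 2 := by push_cast; ring
        have h1 : (1 : Nat) ≤ 2 ^ (k + 1) := Nat.one_le_two_pow
        omega
      have := Nat.size_le.mpr htn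
      omega
    have hrec : (2 : Int) ^ k * 2 = (2 : Int) ^ (k + 1) := by ring
    rw [dif_pos ⟨hpos, hcond⟩, hrec, ih (k + 1) (c + 1) (by omega)]
    have hsz : k + 1 < Nat.size total.toNat := by omega
    -- arithmetic finish
    omega

theorem compute_tree_sizes_eq (n : Int) : compute_tree_sizes n = compute_tree_sizes_alt n := by
  unfold compute_tree_sizes compute_tree_sizes_alt
  set t := PySem.Int.floordiv n 1000 with ht
  have h := ctsLoop_pow t (Nat.size t.toNat - 1) 0 1 rfl
  simp only [pow_zero] at h
  rw [h]
  by_cases h1 : 1 ≤ t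
  · have htn : 1 ≤ t.toNat := by omega
    have hsz : 1 ≤ Nat.size t.toNat := by
      have := Nat.lt_size.mpr (by simpa using htn : 2 ^ 0 ≤ t.toNat)
      omega
    simp [h1]
    omega
  · have htn : t.toNat = 0 := by omega
    simp [h1, htn, Nat.size_zero]

-- ===== VERDICT (by name: the statement is the Claim_ definition above) =====
theorem compute_tree_sizes_spec : Claim_equal_compute_tree_sizes := by
  intro n _
  exact compute_tree_sizes_eq n
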